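-- pv_equiv track=rewrite | github.com/miliar/Code_Jam_Webscraper | solutions_python/solutions_year16_round0_nr4/1192.py | masterTile
-- ===== SOURCE A (Python) =====
-- def masterTile(K,C,k):
--     # returns the position of the direct descendent for a particular subgraph
--     if k > K:
--         return(-1)
--     else:
--         out = k
--         for c in range(C-1,0,-1):
--             out = out + (k-1)*(K**c)
--         return(out)
-- ===== SOURCE B (Python) =====
-- def masterTile(K, C, k):
--     # closed-form geometric-series sum instead of the accumulator loop
--     if k > K:
--         return -1
--     if C <= 1:
--         S = 0
--     elif K == 1:
--         S = C - 1
--     else: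
--         S = (K**C - K) // (K - 1)
--     return k + (k - 1) * S
-- ===== Notes on version B (the rewrite author's own statement) =====
-- stated objective: alternative
-- what changed: Replaces the accumulator loop over range(C-1,0,-1) with the closed-form geometric-series sum S = (K**C - K)//(K-1) (with C<=1 and K==1 special cases), returning k + (k-1)*S.
import Mathlib
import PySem

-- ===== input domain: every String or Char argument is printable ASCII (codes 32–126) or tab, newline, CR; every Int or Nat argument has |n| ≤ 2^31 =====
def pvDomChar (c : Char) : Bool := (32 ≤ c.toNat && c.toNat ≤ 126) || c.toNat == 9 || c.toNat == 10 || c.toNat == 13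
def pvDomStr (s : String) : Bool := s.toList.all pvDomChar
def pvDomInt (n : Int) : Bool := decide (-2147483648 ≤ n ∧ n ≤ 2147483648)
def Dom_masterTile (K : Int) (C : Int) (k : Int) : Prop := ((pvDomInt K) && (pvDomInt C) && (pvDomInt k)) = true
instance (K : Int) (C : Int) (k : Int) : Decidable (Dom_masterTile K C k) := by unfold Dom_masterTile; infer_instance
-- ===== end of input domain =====

-- B replaces A's accumulator loop by the closed-form geometric-series sum (a different algorithm).

-- ===== PORT A =====
def masterTile (K : Int) (C : Int) (k : Int) : Int :=
  if k > K then -1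
  else
    -- out = k; for c in range(C-1, 0, -1): out = out + (k-1)*(K**c)
    (PySem.List.pyRange (C - 1) 0 (-1)).foldl (fun out c => out + (k - 1) * K ^ c.toNat) k

-- ===== PORT B =====
def masterTile_alt (K : Int) (C : Int) (k : Int) : Int :=
  if k > K then -1
  else
    let S : Int :=
      if C ≤ 1 then 0
      else if K = 1 then C - 1
      else PySem.Int.floordiv (K ^ C.toNat - K) (K - 1)
    k + (k - 1) * S

-- ===== PRECONDITION & SPEC =====
def Spec_masterTile (K : Int) (C : Int) (k : Int) (out : Int) : Prop := out = masterTile_alt K C k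
instance (K : Int) (C : Int) (k : Int) (out : Int) : Decidable (Spec_masterTile K C k out) := by unfold Spec_masterTile; infer_instance

-- ===== CLAIM (what is proved, stated in full; the proofs are below) =====
def Claim_equal_masterTile : Prop := ∀ (K : Int) (C : Int) (k : Int), Dom_masterTile K C k → Spec_masterTile K C k (masterTile K C k)

-- ===== LEMMAS AND PROOFS =====

/-- Σ_{c=1}^{n} K^c, the sum A's loop accumulates (times (k-1)). -/
def pvGeom (K : Int) : Nat → Int
  | 0 => 0
  | n + 1 => pvGeom K n + K ^ (n + 1)

theorem pvFold_geom (K k : Int) : ∀ (m : Nat) (init : Int),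
    (PySem.List.pyRange (m : Int) 0 (-1)).foldl (fun out c => out + (k - 1) * K ^ c.toNat) init
      = init + (k - 1) * pvGeom K m := by
  intro m
  induction m with
  | zero => intro init; simp [PySem.List.pyRange_neg_one_eq_nil, pvGeom]
  | succ n ih =>
    intro init
    rw [PySem.List.pyRange_neg_one_cons (by exact_mod_cast Nat.succ_pos n)]
    have h1 : ((n : Int) + 1) - 1 = (n : Int) := by ring
    simp only [List.foldl_cons, Nat.cast_succ, h1, ih]
    have h2 : (((n : Int) + 1)).toNat = n + 1 := by omega
    rw [h2, pvGeom]
    ring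

theorem pvGeom_one : ∀ (n : Nat), pvGeom 1 n = (n : Int) := by
  intro n
  induction n with
  | zero => rfl
  | succ m ih => simp [pvGeom, ih]

theorem pvGeom_mul (K : Int) : ∀ (n : Nat), (K - 1) * pvGeom K n = K ^ (n + 1) - K := by
  intro n
  induction n with
  | zero => simp [pvGeom]
  | succ m ih =>
    rw [pvGeom, mul_add, ih]
    ring

theorem pvFloordiv_exact (q b : Int) (hb : b ≠ 0) : PySem.Int.floordiv (q * b) b = q := by
  have h0 : PySem.Int.mod (q * b) b = 0 := (PySem.Int.mod_eq_zero_iff_dvd _ _).mpr ⟨q, mul_comm q b⟩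
  have h := PySem.Int.floordiv_mul_add_mod (q * b) b
  rw [h0, add_zero] at h
  exact mul_right_cancel₀ hb h

-- ===== VERDICT (by name: the statement is the Claim_ definition above) =====
theorem masterTile_spec : Claim_equal_masterTile := by
  intro K C k _
  unfold Spec_masterTile masterTile masterTile_alt
  by_cases hk : k > K
  · simp [hk]
  · simp only [hk, if_false]
    have hC1 : C - 1 = ((C - 1).toNat : Int) ∨ C ≤ 1 := by omega
    by_cases hC : C ≤ 1
    · have : (C - 1 : Int) ≤ 0 := by omega
      simp [PySem.List.pyRange_neg_one_eq_nil this, hC]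
    · have hc : (C - 1 : Int) = ((C - 1).toNat : Int) := by omega
      rw [hc, pvFold_geom]
      simp only [hC, if_false]
      by_cases hK1 : K = 1
      · subst hK1
        simp [pvGeom_one]
      · simp only [hK1, if_false]
        have hCn : C.toNat = (C - 1).toNat + 1 := by omega
        have hmul := pvGeom_mul K ((C - 1).toNat)
        have hb : K - 1 ≠ 0 := fun h => hK1 (by omega)
        have : K ^ C.toNat - K = pvGeom K ((C - 1).toNat) * (K - 1) := by
          rw [hCn, ← hmul]; ring
        rw [this, pvFloordiv_exact _ _ hb]
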